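-- pv_equiv track=rewrite | github.com/miaoti/BioTest | compares/harnesses/atheris/phase3_mutation_loop.py | _operator_breakdown
-- ===== SOURCE A (Python) =====
-- def _operator_breakdown(records: list[dict]) -> dict[str, dict[str, int]]:
--     """Group tested mutants by operator family; count killed vs survived."""
--     out: dict[str, dict[str, int]] = {}
--     for r in records:
--         fam = r["operator"].split("_", 2)
--         if len(fam) >= 2:
--             key = "_".join(fam[:2])
--         else:
--             key = r["operator"]
--         o = out.setdefault(key, {"killed": 0, "survived": 0})
--         if r["outcome"].startswith("killed"):
--             o["killed"] += 1
--         else: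
--             o["survived"] += 1
--     return out
-- ===== SOURCE B (Python) =====
-- def _operator_breakdown(records: list[dict]) -> dict[str, dict[str, int]]:
--     """Two tally passes (killed / survived) over precomputed family keys, then a merge."""
--     def fam(op):
--         parts = op.split("_", 2)
--         return "_".join(parts[:2]) if len(parts) >= 2 else op
--
--     fams = [fam(r["operator"]) for r in records]
--     kills = [r["outcome"].startswith("killed") for r in records]
--     pairs = list(zip(fams, kills))
--
--     killed = {}
--     for f in [p[0] for p in pairs if p[1]]:
--         killed[f] = killed.get(f, 0) + 1
--     survived = {}
--     for f in [p[0] for p in pairs if not p[1]]: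
--         survived[f] = survived.get(f, 0) + 1
--
--     return {f: {"killed": killed.get(f, 0), "survived": survived.get(f, 0)}
--             for f in dict.fromkeys(fams)}
-- ===== Notes on version B (the rewrite author's own statement) =====
-- stated objective: alternative
-- what changed: A's single loop that setdefaults a nested dict and bumps one of its fields per record is replaced by precomputing family keys and kill flags, two independent filtered tally passes (killed and survived), and a final merge over the deduplicated key order with .get(...,0) defaults.
import Mathlib
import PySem

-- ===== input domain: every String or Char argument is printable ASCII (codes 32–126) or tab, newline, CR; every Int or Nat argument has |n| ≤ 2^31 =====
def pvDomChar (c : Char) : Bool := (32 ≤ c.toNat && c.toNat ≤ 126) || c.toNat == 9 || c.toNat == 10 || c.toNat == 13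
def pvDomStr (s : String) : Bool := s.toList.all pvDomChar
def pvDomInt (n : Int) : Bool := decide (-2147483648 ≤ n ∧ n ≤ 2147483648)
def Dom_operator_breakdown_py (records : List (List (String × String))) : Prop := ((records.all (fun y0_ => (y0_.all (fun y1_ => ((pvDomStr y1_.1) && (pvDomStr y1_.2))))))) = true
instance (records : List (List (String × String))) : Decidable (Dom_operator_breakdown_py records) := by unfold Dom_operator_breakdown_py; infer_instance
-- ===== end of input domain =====

-- B replaces A's single branching accumulation pass by two filtered tally passes over
-- precomputed family keys plus a merge over the deduplicated key order (objective: alternative decomposition).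

-- ===== PORT A =====
-- the body of A's 'for r in records' loop (setdefault then in-place bump of the inner dict)
def opA_step (out : PySem.Dict String (PySem.Dict String Int)) (r : List (String × String)) :
    PySem.Dict String (PySem.Dict String Int) :=
  let d := PySem.Dict.mk r
  let fam := (PySem.Str.splitMax? (d.getD "operator" "") "_" 2).getD []
  let key := if 2 ≤ fam.length then PySem.Str.join "_" (PySem.List.slice fam none (some 2))
             else d.getD "operator" ""
  let out := out.setdefault key (PySem.Dict.mk [("killed", (0 : Int)), ("survived", 0)])
  if PySem.Str.startswith (d.getD "outcome" "") "killed" then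
    out.modify key PySem.Dict.empty (fun o => o.modify "killed" 0 (· + 1))
  else
    out.modify key PySem.Dict.empty (fun o => o.modify "survived" 0 (· + 1))

def operator_breakdown_py (records : List (List (String × String))) : List (String × List (String × Int)) :=
  ((records.foldl opA_step PySem.Dict.empty).items).map (fun p => (p.1, p.2.items))

-- ===== PORT B =====
def pvFam (op : String) : String :=
  let parts := (PySem.Str.splitMax? op "_" 2).getD []
  if 2 ≤ parts.length then PySem.Str.join "_" (PySem.List.slice parts none (some 2)) else op

def operator_breakdown_py_alt (records : List (List (String × String))) : List (String × List (String × Int)) :=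
  let fams := records.map (fun r => pvFam ((PySem.Dict.mk r).getD "operator" ""))
  let kills := records.map (fun r => PySem.Str.startswith ((PySem.Dict.mk r).getD "outcome" "") "killed")
  let pairs := fams.zip kills
  let killed := ((pairs.filter (fun p => p.2)).map (·.1)).foldl
      (fun d f => d.insert f (d.getD f 0 + 1)) PySem.Dict.empty
  let survived := ((pairs.filter (fun p => !p.2)).map (·.1)).foldl
      (fun d f => d.insert f (d.getD f 0 + 1)) PySem.Dict.empty
  (PySem.List.dedup fams).map (fun f => (f, [("killed", killed.getD f 0), ("survived", survived.getD f 0)]))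

-- ===== PRECONDITION & SPEC =====
-- A raises KeyError (and so does B) on a record missing the "operator" or "outcome" key; Pre_ excludes exactly those.
def Pre_operator_breakdown_py (records : List (List (String × String))) : Prop :=
  ∀ r ∈ records, (PySem.Dict.mk r).contains "operator" = true ∧ (PySem.Dict.mk r).contains "outcome" = true
instance (records : List (List (String × String))) : Decidable (Pre_operator_breakdown_py records) := by
  unfold Pre_operator_breakdown_py; infer_instance

def pvWitness_operator_breakdown_py : (List (List (String × String))) :=
  [[("operator", "aor_add_1"), ("outcome", "killed")], [("operator", "lone"), ("outcome", "survived")]]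

def Spec_operator_breakdown_py (records : List (List (String × String))) (out : List (String × List (String × Int))) : Prop := out = operator_breakdown_py_alt records
instance (records : List (List (String × String))) (out : List (String × List (String × Int))) : Decidable (Spec_operator_breakdown_py records out) := by unfold Spec_operator_breakdown_py; infer_instance

-- ===== CLAIM (what is proved, stated in full; the proofs are below) =====
def Claim_equal_operator_breakdown_py : Prop := ∀ (records : List (List (String × String))), Dom_operator_breakdown_py records → Pre_operator_breakdown_py records → Spec_operator_breakdown_py records (operator_breakdown_py records)

-- ===== LEMMAS AND PROOFS =====
def keyOf (r : List (String × String)) : String := pvFam ((PySem.Dict.mk r).getD "operator" "")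
def killOf (r : List (String × String)) : Bool :=
  PySem.Str.startswith ((PySem.Dict.mk r).getD "outcome" "") "killed"

def kcount (records : List (List (String × String))) (f : String) : Int :=
  (((records.filter killOf).map keyOf).count f : Int)
def scount (records : List (List (String × String))) (f : String) : Int :=
  (((records.filter (fun r => !killOf r)).map keyOf).count f : Int)

def canonical (records : List (List (String × String))) (f : String) :
    String × PySem.Dict String Int :=
  (f, PySem.Dict.mk [("killed", kcount records f), ("survived", scount records f)])

lemma opA_step_eq (out : PySem.Dict String (PySem.Dict String Int)) (r : List (String × String)) :
    opA_step out r =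
      (if killOf r then
        (out.setdefault (keyOf r) (PySem.Dict.mk [("killed", (0 : Int)), ("survived", 0)])).modify
          (keyOf r) PySem.Dict.empty (fun o => o.modify "killed" 0 (· + 1))
      else
        (out.setdefault (keyOf r) (PySem.Dict.mk [("killed", (0 : Int)), ("survived", 0)])).modify
          (keyOf r) PySem.Dict.empty (fun o => o.modify "survived" 0 (· + 1))) := rfl

lemma inner_killed (k s : Int) :
    (PySem.Dict.mk [("killed", k), ("survived", s)]).insert "killed"
        ((PySem.Dict.mk [("killed", k), ("survived", s)]).getD "killed" 0 + 1)
      = PySem.Dict.mk [("killed", k + 1), ("survived", s)] := rfl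

lemma inner_survived (k s : Int) :
    (PySem.Dict.mk [("killed", k), ("survived", s)]).insert "survived"
        ((PySem.Dict.mk [("killed", k), ("survived", s)]).getD "survived" 0 + 1)
      = PySem.Dict.mk [("killed", k), ("survived", s + 1)] := rfl

lemma kcount_append (rs : List (List (String × String))) (r : List (String × String)) (f : String) :
    kcount (rs ++ [r]) f = kcount rs f + (if killOf r = true ∧ f = keyOf r then 1 else 0) := by
  unfold kcount
  rw [List.filter_append]
  cases hk : killOf r <;> by_cases hf : f = keyOf r <;>
    simp [hk, hf, eq_comm (a := keyOf r)]

lemma scount_append (rs : List (List (String × String))) (r : List (String × String)) (f : String) :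
    scount (rs ++ [r]) f = scount rs f + (if killOf r = false ∧ f = keyOf r then 1 else 0) := by
  unfold scount
  rw [List.filter_append]
  cases hk : killOf r <;> by_cases hf : f = keyOf r <;>
    simp [hk, hf, eq_comm (a := keyOf r)]

lemma A_items (records : List (List (String × String))) :
    (records.foldl opA_step PySem.Dict.empty).items
      = (PySem.List.dedup (records.map keyOf)).map (canonical records) := by
  induction records using List.reverseRecOn with
  | nil => rfl
  | append_singleton rs r ih =>
    set d := rs.foldl opA_step PySem.Dict.empty with hd
    have hkeys : d.keys = PySem.List.dedup (rs.map keyOf) := by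
      show d.items.map (·.1) = _
      rw [ih, List.map_map]
      exact List.map_id _
    have hnd : d.keys.Nodup := by
      rw [hkeys, PySem.List.dedup_eq_ofList]; exact PySem.Set.nodup_ofList _
    rw [List.foldl_append, List.foldl_cons, List.foldl_nil, opA_step_eq, ← hd]
    have hded : PySem.List.dedup ((rs ++ [r]).map keyOf)
        = PySem.Set.add (PySem.List.dedup (rs.map keyOf)) (keyOf r) := by
      rw [List.map_append]
      simp [PySem.List.dedup_eq_ofList, PySem.Set.ofList_append_singleton]
    by_cases hm : keyOf r ∈ PySem.List.dedup (rs.map keyOf)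
    · -- the family key was seen before: setdefault is a no-op, the stored counters get bumped
      have hcont : d.contains (keyOf r) = true := by
        rw [PySem.Dict.contains_eq_decide_mem_keys, hkeys]; simpa using hm
      have hget : d.getD (keyOf r) PySem.Dict.empty
          = PySem.Dict.mk [("killed", kcount rs (keyOf r)), ("survived", scount rs (keyOf r))] := by
        exact PySem.Dict.getD_of_mem_items d (by rw [ih]; exact List.mem_map_of_mem hm) hnd _
      rw [hded, PySem.Set.add_of_mem hm]
      cases hk : killOf r <;>
        [rw [if_neg (by simp)]; rw [if_pos rfl]] <;>
      · rw [PySem.Dict.setdefault_of_contains _ _ hcont]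
        unfold PySem.Dict.modify
        rw [hget, PySem.Dict.items_insert_of_contains _ _ hcont, ih, List.map_map]
        apply List.map_congr_left
        intro f hf
        by_cases hfk : f = keyOf r
        · subst hfk
          cases hk' : killOf r <;> rw [hk'] at hk <;> simp_all [canonical, inner_killed, inner_survived, kcount_append, scount_append]
        · simp [canonical, hfk, kcount_append, scount_append, hk]
    · -- a new family key: setdefault appends a fresh zero counter pair, then it is bumped
      have hcont : d.contains (keyOf r) = false := by
        rw [PySem.Dict.contains_eq_decide_mem_keys, hkeys]; simpa using hm
      have hnotmem : keyOf r ∉ rs.map keyOf := fun h => hm ((PySem.List.mem_dedup _ _).2 h)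
      have hsub : ∀ (p : List (String × String) → Bool), keyOf r ∉ (rs.filter p).map keyOf := by
        intro p h
        rcases List.mem_map.1 h with ⟨a, ha, heq⟩
        exact hnotmem (heq ▸ List.mem_map_of_mem (List.mem_of_mem_filter ha))
      have hkc : kcount rs (keyOf r) = 0 := by
        simp [kcount, List.count_eq_zero.2 (hsub _)]
      have hsc : scount rs (keyOf r) = 0 := by
        simp [scount, List.count_eq_zero.2 (hsub _)]
      rw [hded, PySem.Set.add_of_not_mem hm]
      cases hk : killOf r <;>
        [rw [if_neg (by simp)]; rw [if_pos rfl]] <;>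
      · rw [PySem.Dict.setdefault_of_not_contains _ _ hcont]
        unfold PySem.Dict.modify
        rw [PySem.Dict.getD_insert_self,
          PySem.Dict.items_insert_of_contains _ _ (PySem.Dict.contains_insert_self _ _ _),
          PySem.Dict.items_insert_of_not_contains _ _ hcont, ih,
          List.map_append, List.map_map, List.map_append]
        congr 1
        · apply List.map_congr_left
          intro f hf
          have hfk : f ≠ keyOf r := fun h => hm (h ▸ hf)
          simp [canonical, hfk, kcount_append, scount_append, hk]
        · simp [canonical, kcount_append, scount_append, hk, hkc, hsc, inner_killed, inner_survived]

lemma B_eq (records : List (List (String × String))) :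
    operator_breakdown_py_alt records
      = (PySem.List.dedup (records.map keyOf)).map
          (fun f => (f, [("killed", kcount records f), ("survived", scount records f)])) := by
  unfold operator_breakdown_py_alt kcount scount
  simp only [List.zip_map', List.filter_map, List.map_map, PySem.Dict.getD_foldl_insert_add_one,
    PySem.Dict.getD_empty, Function.comp_def, zero_add]
  rfl

-- ===== VERDICT (by name: the statement is the Claim_ definition above) =====
theorem operator_breakdown_py_spec : Claim_equal_operator_breakdown_py := by
  intro records _ _
  unfold Spec_operator_breakdown_py
  rw [operator_breakdown_py, A_items, B_eq, List.map_map]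
  rfl
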